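-- pv_equiv track=rewrite | github.com/horizonfps/project-lunar | backend/app/engines/llm_router.py | _sanitize_messages_for_anthropic
-- ===== SOURCE A (Python) =====
-- def _sanitize_messages_for_anthropic(messages: list[dict]) -> list[dict]:
--     """Anthropic requires the first non-system message to have role=user.
--
--     Legacy campaigns persisted the AI opening as a leading assistant
--     message; drop any leading assistant messages so the request is
--     accepted. The opening is now injected as system context, so no
--     information is lost.
--     """
--     out: list[dict] = []
--     seen_first_non_system = False
--     for msg in messages:
--         role = msg.get("role")
--         if role == "system":
--             out.append(msg)
--             continue
--         if not seen_first_non_system and role == "assistant":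
--             continue
--         seen_first_non_system = True
--         out.append(msg)
--     return out
-- ===== SOURCE B (Python) =====
-- def _sanitize_messages_for_anthropic(messages: list[dict]) -> list[dict]:
--     """Locate the first message whose role is neither 'system' nor 'assistant';
--     keep everything from there on, plus all system messages."""
--     cutoff = next(
--         (i for i, m in enumerate(messages)
--          if m.get("role") not in ("system", "assistant")),
--         len(messages),
--     )
--     return [m for i, m in enumerate(messages)
--             if i >= cutoff or m.get("role") == "system"]
-- ===== Notes on version B (the rewrite author's own statement) =====
-- stated objective: alternative
-- what changed: Replaces the stateful seen-first-non-system flag loop with a locate-the-cutoff-index pass plus one index-aware comprehension (keep index >= cutoff or role == 'system').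
import Mathlib
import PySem

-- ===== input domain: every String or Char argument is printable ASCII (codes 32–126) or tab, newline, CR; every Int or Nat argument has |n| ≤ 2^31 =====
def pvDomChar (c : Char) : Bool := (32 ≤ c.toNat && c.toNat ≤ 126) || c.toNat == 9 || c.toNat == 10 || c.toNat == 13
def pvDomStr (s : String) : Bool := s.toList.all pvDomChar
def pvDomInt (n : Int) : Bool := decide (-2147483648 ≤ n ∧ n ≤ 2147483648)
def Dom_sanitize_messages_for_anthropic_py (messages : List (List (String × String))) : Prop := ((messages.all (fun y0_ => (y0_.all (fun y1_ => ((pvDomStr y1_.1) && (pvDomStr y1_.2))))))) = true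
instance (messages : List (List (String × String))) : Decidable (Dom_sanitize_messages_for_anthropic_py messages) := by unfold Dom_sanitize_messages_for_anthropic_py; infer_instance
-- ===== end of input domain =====

-- B replaces A's stateful seen-flag loop with a cutoff-index scan plus an index-aware filter; same return value, proved equal.


-- ===== PORT A =====
-- A's loop: accumulator `out`, flag `seen_first_non_system`, branches in A's order.
def pvRole (m : List (String × String)) : Option String := PySem.Dict.get? (PySem.Dict.mk m) "role"

def pvAuxA (rest : List (List (String × String))) (seen : Bool)
    (out : List (List (String × String))) : List (List (String × String)) :=
  match rest with
  | [] => out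
  | m :: rest =>
    let role := pvRole m
    if role = some "system" then pvAuxA rest seen (out ++ [m])
    else if seen = false ∧ role = some "assistant" then pvAuxA rest seen out
    else pvAuxA rest true (out ++ [m])

def sanitize_messages_for_anthropic_py (messages : List (List (String × String))) : List (List (String × String)) :=
  pvAuxA messages false []

-- ===== PORT B =====
-- Source B: first find cutoff = index of first non-system/non-assistant message (default len),
-- then one index-aware filter keeping i >= cutoff or system messages.
def pvFindCutoff (rest : List (List (String × String))) (i : Nat) : Nat :=
  match rest with
  | [] => i
  | m :: rest =>
    if pvRole m ≠ some "system" ∧ pvRole m ≠ some "assistant" then i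
    else pvFindCutoff rest (i + 1)

def pvKeepFrom (rest : List (List (String × String))) (i : Nat) (cutoff : Nat) : List (List (String × String)) :=
  match rest with
  | [] => []
  | m :: rest =>
    if cutoff ≤ i ∨ pvRole m = some "system" then m :: pvKeepFrom rest (i + 1) cutoff
    else pvKeepFrom rest (i + 1) cutoff

def sanitize_messages_for_anthropic_py_alt (messages : List (List (String × String))) : List (List (String × String)) :=
  pvKeepFrom messages 0 (pvFindCutoff messages 0)

-- ===== PRECONDITION & SPEC =====
def Spec_sanitize_messages_for_anthropic_py (messages : List (List (String × String))) (out : List (List (String × String))) : Prop := out = sanitize_messages_for_anthropic_py_alt messages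
instance (messages : List (List (String × String))) (out : List (List (String × String))) : Decidable (Spec_sanitize_messages_for_anthropic_py messages out) := by unfold Spec_sanitize_messages_for_anthropic_py; infer_instance

-- ===== CLAIM (what is proved, stated in full; the proofs are below) =====
def Claim_equal_sanitize_messages_for_anthropic_py : Prop := ∀ (messages : List (List (String × String))), Dom_sanitize_messages_for_anthropic_py messages → Spec_sanitize_messages_for_anthropic_py messages (sanitize_messages_for_anthropic_py messages)

-- ===== LEMMAS AND PROOFS =====

theorem pvAuxA_append (rest : List (List (String × String))) (seen : Bool)
    (out : List (List (String × String))) : pvAuxA rest seen out = out ++ pvAuxA rest seen [] := by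
  induction rest generalizing seen out with
  | nil => simp [pvAuxA]
  | cons m rest ih =>
    simp only [pvAuxA]
    split_ifs with h1 h2
    · rw [ih seen (out ++ [m]), ih seen ([] ++ [m])]; simp
    · exact ih seen out
    · rw [ih true (out ++ [m]), ih true ([] ++ [m])]; simp

theorem pvAuxA_true (rest : List (List (String × String))) (out : List (List (String × String))) :
    pvAuxA rest true out = out ++ rest := by
  induction rest generalizing out with
  | nil => simp [pvAuxA]
  | cons m rest ih =>
    simp only [pvAuxA]
    split_ifs with h1 h2
    · rw [ih]; simp
    · exact absurd h2.1 (by simp)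
    · rw [ih]; simp

theorem pvFindCutoff_shift (rest : List (List (String × String))) (i : Nat) :
    pvFindCutoff rest (i + 1) = pvFindCutoff rest i + 1 := by
  induction rest generalizing i with
  | nil => simp [pvFindCutoff]
  | cons m rest ih =>
    simp only [pvFindCutoff]
    split_ifs with h
    · rfl
    · exact ih (i + 1)

theorem pvKeepFrom_shift (rest : List (List (String × String))) (i c : Nat) :
    pvKeepFrom rest (i + 1) (c + 1) = pvKeepFrom rest i c := by
  induction rest generalizing i with
  | nil => rfl
  | cons m rest ih =>
    simp only [pvKeepFrom, Nat.add_le_add_iff_right, ih]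

theorem pvKeepFrom_zero (rest : List (List (String × String))) (i : Nat) :
    pvKeepFrom rest i 0 = rest := by
  induction rest generalizing i with
  | nil => rfl
  | cons m rest ih =>
    simp only [pvKeepFrom]
    rw [if_pos (Or.inl (Nat.zero_le i)), ih]

theorem pv_main (messages : List (List (String × String))) :
    pvAuxA messages false [] = pvKeepFrom messages 0 (pvFindCutoff messages 0) := by
  induction messages with
  | nil => rfl
  | cons m rest ih =>
    by_cases hs : pvRole m = some "system"
    · have hc : pvFindCutoff (m :: rest) 0 = pvFindCutoff rest 0 + 1 := by
        simp only [pvFindCutoff]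
        rw [if_neg (by simp [hs]), pvFindCutoff_shift]
      rw [hc]
      show pvAuxA (m :: rest) false [] = pvKeepFrom (m :: rest) 0 (pvFindCutoff rest 0 + 1)
      simp only [pvAuxA, pvKeepFrom]
      rw [if_pos hs, if_pos (Or.inr hs), pvAuxA_append, pvKeepFrom_shift, ih]
      simp
    · by_cases ha : pvRole m = some "assistant"
      · have hc : pvFindCutoff (m :: rest) 0 = pvFindCutoff rest 0 + 1 := by
          simp only [pvFindCutoff]
          rw [if_neg (by simp [ha]), pvFindCutoff_shift]
        rw [hc]
        show pvAuxA (m :: rest) false [] = pvKeepFrom (m :: rest) 0 (pvFindCutoff rest 0 + 1)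
        simp only [pvAuxA, pvKeepFrom]
        rw [if_neg hs, if_pos ⟨trivial, ha⟩, if_neg (by push Not; exact ⟨by omega, hs⟩),
          pvKeepFrom_shift, ih]
      · have hc : pvFindCutoff (m :: rest) 0 = 0 := by
          simp only [pvFindCutoff]
          rw [if_pos ⟨hs, ha⟩]
        rw [hc]
        show pvAuxA (m :: rest) false [] = pvKeepFrom (m :: rest) 0 0
        simp only [pvAuxA, pvKeepFrom]
        rw [if_neg hs, if_neg (by simp [ha]), if_pos (Or.inl (Nat.le_refl 0)),
          pvAuxA_true, pvKeepFrom_zero]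
        simp

-- ===== VERDICT (by name: the statement is the Claim_ definition above) =====
theorem sanitize_messages_for_anthropic_py_spec : Claim_equal_sanitize_messages_for_anthropic_py := by
  intro messages _
  unfold Spec_sanitize_messages_for_anthropic_py sanitize_messages_for_anthropic_py sanitize_messages_for_anthropic_py_alt
  exact pv_main messages
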